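-- pv_equiv track=rewrite | github.com/htang7415/Code-Lab | modules/databases/nosql/secondary-indexes-in-lsm-systems/python/secondary_indexes_in_lsm_systems.py | build_secondary_index
-- ===== SOURCE A (Python) =====
-- def build_secondary_index(
--     rows: list[dict[str, object]],
--     field: str,
-- ) -> dict[object, list[str]]:
--     index: dict[object, list[str]] = {}
--     for row in rows:
--         value = row.get(field)
--         index.setdefault(value, []).append(str(row["id"]))
--     return {
--         value: sorted(ids)
--         for value, ids in index.items()
--     }
-- ===== SOURCE B (Python) =====
-- def build_secondary_index(
--     rows: list[dict[str, object]],
--     field: str,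
-- ) -> dict[object, list[str]]:
--     # No intermediate dict-of-lists: dedup the field values (first-appearance
--     # order, matching A's key order), then build each bucket by a per-value
--     # filter over the rows.
--     values = dict.fromkeys(row.get(field) for row in rows)
--     return {
--         v: sorted(str(row["id"]) for row in rows if row.get(field) == v)
--         for v in values
--     }
-- ===== Notes on version B (the rewrite author's own statement) =====
-- stated objective: simpler
-- what changed: Removes the mutable dict-of-lists accumulator: B deduplicates the field values once (dict.fromkeys, first-appearance order) and builds each bucket by a per-value filter comprehension over the rows; it trades the single grouping pass for k filter passes.
import Mathlib
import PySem

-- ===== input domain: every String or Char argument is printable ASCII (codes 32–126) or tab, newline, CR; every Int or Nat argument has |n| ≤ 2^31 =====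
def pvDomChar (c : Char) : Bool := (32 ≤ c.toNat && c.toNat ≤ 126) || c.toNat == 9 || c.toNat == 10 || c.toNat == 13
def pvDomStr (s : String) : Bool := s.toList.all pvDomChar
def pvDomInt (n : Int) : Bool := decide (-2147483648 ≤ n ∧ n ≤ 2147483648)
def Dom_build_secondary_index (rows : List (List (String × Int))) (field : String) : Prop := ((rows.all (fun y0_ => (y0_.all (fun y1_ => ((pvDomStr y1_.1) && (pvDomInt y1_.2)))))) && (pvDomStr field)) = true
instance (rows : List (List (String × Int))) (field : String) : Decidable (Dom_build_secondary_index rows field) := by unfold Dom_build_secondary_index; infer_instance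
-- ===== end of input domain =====

-- B drops A's mutable dict-of-lists: it dedups the field values (first-appearance
-- order) and builds each bucket by a per-value filter over the rows (simpler; not faster).


-- ===== PORT A =====
-- str(row["id"]); outside Pre_ (missing "id") Python raises KeyError, so the
-- getD default is never reached on admitted inputs.
def pvKeyStr (r : List (String × Int)) : String :=
  PySem.Int.toStr ((r.lookup "id").getD 0)

-- row.get(field): first-match lookup in the association list (Python dict)
def pvVal (field : String) (r : List (String × Int)) : Option Int :=
  r.lookup field

def build_secondary_index (rows : List (List (String × Int))) (field : String) : List (Option Int × List String) :=
  let index : PySem.Dict (Option Int) (List String) :=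
    rows.foldl (fun d r => d.modify (pvVal field r) [] (fun ids => ids ++ [pvKeyStr r])) PySem.Dict.empty
  index.items.map (fun p => (p.1, PySem.List.sorted p.2 (fun s => s) false))

-- ===== PORT B =====
def build_secondary_index_alt (rows : List (List (String × Int))) (field : String) : List (Option Int × List String) :=
  let values := PySem.List.dedup (rows.map (fun r => pvVal field r))
  values.map (fun v =>
    (v, PySem.List.sorted ((rows.filter (fun r => pvVal field r == v)).map pvKeyStr) (fun s => s) false))

-- ===== PRECONDITION & SPEC =====
-- Pre_ excludes rows without an "id" key: there Python A (and B) raise KeyError.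
def Pre_build_secondary_index (rows : List (List (String × Int))) (field : String) : Prop :=
  ∀ r ∈ rows, "id" ∈ r.map Prod.fst
instance (rows : List (List (String × Int))) (field : String) : Decidable (Pre_build_secondary_index rows field) := by unfold Pre_build_secondary_index; infer_instance

def pvWitness_build_secondary_index : (List (List (String × Int))) × String :=
  ([[("id", 1), ("c", 7)], [("id", 2), ("c", 7)], [("id", 10), ("c", 3)]], "c")

def Spec_build_secondary_index (rows : List (List (String × Int))) (field : String) (out : List (Option Int × List String)) : Prop := out = build_secondary_index_alt rows field
instance (rows : List (List (String × Int))) (field : String) (out : List (Option Int × List String)) : Decidable (Spec_build_secondary_index rows field out) := by unfold Spec_build_secondary_index; infer_instance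

-- ===== CLAIM (what is proved, stated in full; the proofs are below) =====
def Claim_equal_build_secondary_index : Prop := ∀ (rows : List (List (String × Int))) (field : String), Dom_build_secondary_index rows field → Pre_build_secondary_index rows field → Spec_build_secondary_index rows field (build_secondary_index rows field)

-- ===== LEMMAS AND PROOFS =====

-- the per-value bucket of id-strings, in row order
def pvGrp (field : String) (rows : List (List (String × Int))) (v : Option Int) : List String :=
  (rows.filter (fun r => pvVal field r == v)).map pvKeyStr

-- getD of A's modify-append fold, via PySem.Dict.getD_foldl_modify_append
lemma getD_fold (field : String) (rows : List (List (String × Int)))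
    (d : PySem.Dict (Option Int) (List String)) (v : Option Int) :
    (rows.foldl (fun d r => d.modify (pvVal field r) [] (fun ids => ids ++ [pvKeyStr r])) d).getD v []
      = d.getD v [] ++ pvGrp field rows v := by
  have h := PySem.Dict.getD_foldl_modify_append
    (l := rows.map (fun r => (pvVal field r, pvKeyStr r))) (d := d) (c := v)
  rw [List.foldl_map] at h
  simpa [pvGrp, List.filter_map, Function.comp_def] using h

theorem build_secondary_index_spec : Claim_equal_build_secondary_index := by
  intro rows field _ _
  simp only [Spec_build_secondary_index, build_secondary_index, build_secondary_index_alt]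
  set K : PySem.Set (Option Int) := PySem.Set.ofList (rows.map (fun r => pvVal field r)) with hK
  set dA := rows.foldl (fun d r => d.modify (pvVal field r) [] (fun ids => ids ++ [pvKeyStr r])) PySem.Dict.empty with hdA
  have hAkeys : dA.keys = K := by
    rw [hdA, PySem.Dict.keys_foldl_modify_key]
    simp [PySem.Set.update_nil_left, hK]
  have hAnodup : dA.keys.Nodup := by rw [hAkeys, hK]; exact PySem.Set.nodup_ofList _
  have hAitems : dA.items = K.map (fun v => (v, pvGrp field rows v)) := by
    rw [PySem.Dict.items_eq_map_keys dA hAnodup [], hAkeys]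
    refine List.map_congr_left (fun v _ => ?_)
    rw [hdA, getD_fold]
    simp
  rw [hAitems, List.map_map, PySem.List.dedup_eq_ofList, ← hK]
  rfl
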